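-- pv_equiv track=rewrite | github.com/hcoin/pydbus | pydbus/translator.py | _isolate_format
-- ===== SOURCE A (Python) =====
-- def _isolate_format(args):
--     '''a helper function that breaks an introspection string
--     into single variable instances. So a{sa{si}}u would
--     return a{sa{si}} on the first call, and u on the second.
--     when there is no further guidance, None is returned.
--     '''
--     if args == None: return (None, None)
--     if len(args) == 0: return (None, None)
--     if args[0] not in 'a({v':
--         rem = args[1:]
--         return (args[0], rem if len(rem) > 0 else None)
--     if len(args) < 2: return (None, None)
--     if args[0] == 'a':
--         next_arg, remainder = _isolate_format(args[1:])
--         return ('a' + next_arg, remainder)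
--     if args[0] == 'v':
--         level = 1
--         index = 2
--         next_arg = 'v:'
--         while (level > 0) and (index < len(args)):
--             if args[index] == 'v': level += 2
--             elif args[index] == ':': level -= 1
--             next_arg += args[index]
--             index += 1
--         if level != 0: next_arg += ':'  # 'defensive programming 101'
--         return (next_arg, args[index:])
--     next_arg = args[0]  # '( or {'
--     target = ')' if args[0] == '(' else '}'
--     inner_arg = ' '
--     pattern = args[1:]
--     while inner_arg != target:
--         inner_arg, remainder = _isolate_format(pattern)
--         next_arg += inner_arg
--         pattern = remainder
--     return (next_arg, remainder)
-- ===== SOURCE B (Python) =====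
-- def _isolate_format(args):
--     '''Iterative single-pass re-implementation: one left-to-right scan with an
--     explicit stack of expected closing brackets and a pending array-prefix
--     flag, instead of recursive string slicing.  On signatures the recursive
--     version cannot parse (truncated/unbalanced input) it returns (None, None).'''
--     if not args:
--         return (None, None)
--     n = len(args)
--     out = []
--     closers = []        # stack of expected ')' / '}'
--     pending_a = False   # True while inside an 'a...' prefix of the current element
--     i = 0
--     while i < n:
--         c = args[i]
--         if c == 'a':
--             out.append(c)
--             pending_a = True
--             i += 1
--             continue
--         if c == '(' or c == '{':
--             out.append(c)
--             closers.append(')' if c == '(' else '}')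
--             pending_a = False
--             i += 1
--             continue
--         if c == 'v':
--             if i + 1 >= n:
--                 return (None, None)
--             out.append('v:')
--             level, i = 1, i + 2
--             while level > 0 and i < n:
--                 ch = args[i]
--                 if ch == 'v':
--                     level += 2
--                 elif ch == ':':
--                     level -= 1
--                 out.append(ch)
--                 i += 1
--             if level:
--                 out.append(':')
--             if not closers:
--                 return (''.join(out), args[i:])
--             pending_a = False
--             continue
--         out.append(c)
--         i += 1
--         if closers and not pending_a and c == closers[-1]:
--             closers.pop()
--         if not closers:
--             return (''.join(out), args[i:] or None)
--         pending_a = False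
--     return (None, None)
-- ===== Notes on version B (the rewrite author's own statement) =====
-- stated objective: alternative
-- what changed: The recursive descent with repeated string slicing (args[1:] at every step, plus a re-parsing loop for bracketed groups) is replaced by a single left-to-right index scan that keeps an explicit stack of expected closing brackets and a pending array-prefix flag, building the output in one pass with no slicing and no recursion.
import Mathlib
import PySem

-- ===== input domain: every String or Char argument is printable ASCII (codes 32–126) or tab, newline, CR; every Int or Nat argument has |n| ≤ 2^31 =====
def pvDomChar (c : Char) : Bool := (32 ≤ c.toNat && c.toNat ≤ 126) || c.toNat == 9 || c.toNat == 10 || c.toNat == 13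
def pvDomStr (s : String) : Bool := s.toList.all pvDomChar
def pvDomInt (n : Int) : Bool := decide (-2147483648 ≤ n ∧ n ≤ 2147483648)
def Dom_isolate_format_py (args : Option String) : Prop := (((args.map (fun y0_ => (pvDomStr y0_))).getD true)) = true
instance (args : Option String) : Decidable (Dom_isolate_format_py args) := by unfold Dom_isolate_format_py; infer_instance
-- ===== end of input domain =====

-- B replaces A's recursive string-slicing descent by one left-to-right scan with an
-- explicit stack of expected closing brackets (objective: alternative, no recursion or
-- slicing; equivalence is on return values, neither program mutates its argument).

-- ===== PORT A =====
-- the inner `while (level > 0) and (index < len(args))` loop of the 'v' branch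
-- (identical in both Python sources); returns (chars appended to next_arg, args[index:])
def pvVScan : List Char → Nat → List Char × List Char
  | l, 0 => ([], l)
  | [], _ + 1 => ([':'], [])  -- loop exhausted with level ≠ 0: `next_arg += ':'`
  | c :: t, lvl + 1 =>
    ((c :: (pvVScan t (if c = 'v' then lvl + 3 else if c = ':' then lvl else lvl + 1)).1),
     (pvVScan t (if c = 'v' then lvl + 3 else if c = ':' then lvl else lvl + 1)).2)

mutual
-- _isolate_format on a non-None string, over List Char; fuel only bounds recursion
-- depth (2·len+4 at the top always suffices).  Where the Python raises TypeError
-- (string + None concatenation) the port returns (none, none); those inputs are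
-- excluded by Pre_ below.
def pvCoreA : Nat → List Char → Option (List Char) × Option (List Char)
  | 0, _ => (none, none)
  | _ + 1, [] => (none, none)                     -- len(args) == 0
  | fuel + 1, c :: rest =>
    if ¬(c = 'a' ∨ c = '(' ∨ c = '{' ∨ c = 'v') then   -- args[0] not in 'a({v'
      (some [c], if rest = [] then none else some rest)
    else if rest = [] then (none, none)           -- len(args) < 2
    else if c = 'a' then
      match pvCoreA fuel rest with
      | (some na, rem) => (some ('a' :: na), rem)
      | (none, _) => (none, none)                 -- Python: 'a' + None raises TypeError
    else if c = 'v' then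
      match rest with
      | [] => (none, none)                        -- unreachable (rest ≠ [])
      | _ :: t2 =>
        (some ('v' :: ':' :: (pvVScan t2 1).1), some (pvVScan t2 1).2)
    else
      pvPloopA fuel [c] (if c = '(' then ')' else '}') (some rest)
  termination_by fuel _ => (fuel, 0)
  decreasing_by all_goals simp_wf <;> omega

-- `if args == None: return (None, None)` at the head of the recursive call
def pvCoreAOpt : Nat → Option (List Char) → Option (List Char) × Option (List Char)
  | _, none => (none, none)
  | fuel, some p => pvCoreA fuel p
  termination_by fuel _ => (fuel, 1)
  decreasing_by all_goals simp_wf <;> omega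

-- the `while inner_arg != target` loop of the bracket-group branch
def pvPloopA : Nat → List Char → Char → Option (List Char) → Option (List Char) × Option (List Char)
  | 0, _, _, _ => (none, none)
  | fuel + 1, acc, target, pat =>
    match pvCoreAOpt fuel pat with
    | (none, _) => (none, none)                   -- Python: next_arg += None raises TypeError
    | (some inner, rem) =>
      if inner = [target] then (some (acc ++ inner), rem)
      else pvPloopA fuel (acc ++ inner) target rem
  termination_by fuel _ _ _ => (fuel, 2)
  decreasing_by all_goals simp_wf <;> omega
end

def isolate_format_py (args : Option String) : Option String × Option String :=
  match args with
  | none => (none, none)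
  | some s =>
    ((pvCoreA (2 * s.toList.length + 4) s.toList).1.map String.ofList,
     (pvCoreA (2 * s.toList.length + 4) s.toList).2.map String.ofList)

-- ===== PORT B =====
-- single left-to-right scan; state: output accumulator, stack of expected closers,
-- pending array-prefix flag.  Fuel = length+1 always suffices (every step consumes ≥ 1 char).
def pvBloop : Nat → List Char → List Char → Bool → List Char → Option (List Char) × Option (List Char)
  | 0, _, _, _, _ => (none, none)
  | _ + 1, _, _, _, [] => (none, none)            -- scan exhausted: incomplete type
  | fuel + 1, out, closers, pending, c :: t =>
    if c = 'a' then pvBloop fuel (out ++ [c]) closers true t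
    else if c = '(' ∨ c = '{' then
      pvBloop fuel (out ++ [c]) ((if c = '(' then ')' else '}') :: closers) false t
    else if c = 'v' then
      match t with
      | [] => (none, none)
      | _ :: t2 =>
        if closers = [] then
          (some (out ++ 'v' :: ':' :: (pvVScan t2 1).1), some (pvVScan t2 1).2)
        else pvBloop fuel (out ++ 'v' :: ':' :: (pvVScan t2 1).1) closers false (pvVScan t2 1).2
    else
      match closers with
      | [] => (some (out ++ [c]), if t = [] then none else some t)
      | tc :: cs =>
        if pending = false ∧ c = tc then
          if cs = [] then (some (out ++ [c]), if t = [] then none else some t)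
          else pvBloop fuel (out ++ [c]) cs false t
        else pvBloop fuel (out ++ [c]) (tc :: cs) false t

def isolate_format_py_alt (args : Option String) : Option String × Option String :=
  match args with
  | none => (none, none)
  | some s =>
    ((pvBloop (s.toList.length + 1) [] [] false s.toList).1.map String.ofList,
     (pvBloop (s.toList.length + 1) [] [] false s.toList).2.map String.ofList)

-- ===== PRECONDITION & SPEC =====
-- grammar recognizer for Pre_: the `args[index:]` suffix left after the 'v' branch scan
def pvVSkip : List Char → Nat → List Char
  | l, 0 => l
  | [], _ + 1 => []
  | c :: t, lvl + 1 => pvVSkip t (if c = 'v' then lvl + 3 else if c = ':' then lvl else lvl + 1)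

-- a compound-type opener and its expected closer
def pvOpener (d : Char) : Bool := d = 'a' || d = '(' || d = '{' || d = 'v'

-- Grammar of "the string starts with one complete D-Bus type" (the language the
-- docstring describes): grammar mode `false` accepts one type, mode `true` accepts a
-- run of types ended by the closer `w`; the depth bound 2·n+2 used in Pre_ always
-- suffices, so this is a plain recognizer for the grammar, not a re-run of a port.
def pvOkF : Nat → Bool → Char → List Char → Option (List Char)
  | 0, _, _, _ => none
  | k + 1, false, _, [] => none
  | k + 1, false, _, [d] => if pvOpener d then none else some []
  | k + 1, false, _, d :: d2 :: r =>
    if pvOpener d = false then some (d2 :: r)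
    else if d = 'a' then pvOkF k false ' ' (d2 :: r)
    else if d = 'v' then some (pvVSkip r 1)
    else pvOkF k true (if d = '{' then '}' else ')') (d2 :: r)
  | k + 1, true, w, [] => none
  | k + 1, true, w, d :: r =>
    if d = w then some r
    else
      (pvOkF k false ' ' (d :: r)).bind (pvOkF k true w)

-- Pre_ excludes exactly the strings of length ≥ 2 whose leading type is malformed (a
-- dangling array prefix or an unclosed bracket group): there the Python A raises
-- TypeError from a string + None concatenation; on every admitted input A returns.
-- (The Lean equivalence below happens to hold on all inputs, because both ports
-- return (none, none) on A's raise paths; Pre_ is about the Python behaviour.)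
def Pre_isolate_format_py (args : Option String) : Prop :=
  ((args.map (fun s =>
      decide (s.toList.length ≤ 1) || (pvOkF (2 * s.toList.length + 2) false ' ' s.toList).isSome)).getD true) = true
instance (args : Option String) : Decidable (Pre_isolate_format_py args) := by
  unfold Pre_isolate_format_py; infer_instance

def pvWitness_isolate_format_py : Option String := some "a{sa{si}}u"

def Spec_isolate_format_py (args : Option String) (out : Option String × Option String) : Prop := out = isolate_format_py_alt args
instance (args : Option String) (out : Option String × Option String) : Decidable (Spec_isolate_format_py args out) := by unfold Spec_isolate_format_py; infer_instance

-- ===== CLAIM (what is proved, stated in full; the proofs are below) =====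
def Claim_equal_isolate_format_py : Prop := ∀ (args : Option String), Dom_isolate_format_py args → Pre_isolate_format_py args → Spec_isolate_format_py args (isolate_format_py args)

-- ===== LEMMAS AND PROOFS =====

def pvOptLen : Option (List Char) → Nat
  | none => 0
  | some l => l.length

lemma pvVScan_len : ∀ (l : List Char) (lvl : Nat), (pvVScan l lvl).2.length ≤ l.length := by
  intro l
  induction l with
  | nil => intro lvl; cases lvl <;> simp [pvVScan]
  | cons c t ih =>
    intro lvl
    cases lvl with
    | zero => simp [pvVScan]
    | succ k =>
      simp only [pvVScan]
      exact le_trans (ih _) (by simp)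

lemma pvBloop_nil : ∀ (f : Nat) (o cl : List Char) (p : Bool), pvBloop f o cl p [] = (none, none) := by
  intro f o cl p; cases f <;> rfl

lemma pvCoreA_zero : ∀ (l : List Char), pvCoreA 0 l = (none, none) := by
  intro l; simp [pvCoreA]

lemma pvPloopA_zero : ∀ (acc : List Char) (tc : Char) (pat : Option (List Char)),
    pvPloopA 0 acc tc pat = (none, none) := by
  intro acc tc pat; simp [pvPloopA]

lemma pvCoreA_nil : ∀ (f : Nat), pvCoreA f [] = (none, none) := by
  intro f; cases f with
  | zero => exact pvCoreA_zero []
  | succ f => simp [pvCoreA]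

lemma pvCoreAOpt_some : ∀ (f : Nat) (p : List Char), pvCoreAOpt f (some p) = pvCoreA f p := by
  intro f p; simp [pvCoreAOpt]

lemma pvCoreAOpt_none : ∀ (f : Nat), pvCoreAOpt f none = (none, none) := by
  intro f; simp [pvCoreAOpt]

lemma pvPloopA_none : ∀ (f : Nat) (acc : List Char) (tc : Char), pvPloopA f acc tc none = (none, none) := by
  intro f acc tc; cases f with
  | zero => exact pvPloopA_zero acc tc none
  | succ f => simp [pvPloopA, pvCoreAOpt_none]

-- accumulator lemma for the bracket-group loop
lemma pv_acc : ∀ (fuel : Nat) (acc : List Char) (tc : Char) (pat : Option (List Char)),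
    pvPloopA fuel acc tc pat =
      (match pvPloopA fuel [] tc pat with
       | (none, _) => (none, none)
       | (some e, rem) => (some (acc ++ e), rem)) := by
  intro fuel
  induction fuel with
  | zero => intro acc tc pat; simp [pvPloopA_zero]
  | succ f ih =>
    intro acc tc pat
    simp only [pvPloopA]
    cases hco : pvCoreAOpt f pat with
    | mk i r =>
      cases i with
      | none => rfl
      | some inner =>
        by_cases hit : inner = [tc]
        · simp [hit]
        · simp only [if_neg hit]
          rw [ih (acc ++ inner), ih ([] ++ inner)]
          cases hp : pvPloopA f [] tc r with
          | mk e2 r2 =>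
            cases e2 with
            | none => rfl
            | some e2 => simp

-- every successfully parsed element is nonempty and consumes at least one character
lemma pv_elem : ∀ (fuel : Nat),
    (∀ l e rem, pvCoreA fuel l = (some e, rem) → e ≠ [] ∧ pvOptLen rem < l.length) ∧
    (∀ tc pat e rem, pvPloopA fuel [] tc pat = (some e, rem) →
       e ≠ [] ∧ ∃ p, pat = some p ∧ pvOptLen rem < p.length) := by
  intro fuel
  induction fuel with
  | zero =>
    constructor
    · intro l e rem h; rw [pvCoreA_zero] at h; exact absurd h (by simp)
    · intro tc pat e rem h; rw [pvPloopA_zero] at h; exact absurd h (by simp)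
  | succ f ih =>
    constructor
    · intro l e rem h
      cases l with
      | nil => rw [pvCoreA_nil] at h; exact absurd h (by simp)
      | cons c rest =>
        unfold pvCoreA at h
        by_cases h1 : ¬(c = 'a' ∨ c = '(' ∨ c = '{' ∨ c = 'v')
        · rw [if_pos h1] at h
          obtain ⟨he, hr⟩ := Prod.mk.injEq .. ▸ h
          cases he
          refine ⟨by simp, ?_⟩
          cases rest with
          | nil => simp [← hr, pvOptLen]
          | cons x xs => simp [← hr, pvOptLen]
        · rw [if_neg h1] at h
          by_cases h2 : rest = []
          · rw [if_pos h2] at h; exact absurd h (by simp)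
          · rw [if_neg h2] at h
            by_cases h3 : c = 'a'
            · rw [if_pos h3] at h
              cases hc : pvCoreA f rest with
              | mk na r =>
                rw [hc] at h
                cases na with
                | none => exact absurd h (by simp)
                | some na =>
                  obtain ⟨he, hr⟩ := Prod.mk.injEq .. ▸ h
                  cases he
                  have := (ih.1 rest na r hc).2
                  exact ⟨by simp, by rw [← hr]; simp; omega⟩
            · rw [if_neg h3] at h
              by_cases h4 : c = 'v'
              · rw [if_pos h4] at h
                cases rest with
                | nil => exact absurd rfl h2
                | cons x t2 =>
                  obtain ⟨he, hr⟩ := Prod.mk.injEq .. ▸ h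
                  cases he
                  have := pvVScan_len t2 1
                  exact ⟨by simp, by rw [← hr]; simp [pvOptLen]; omega⟩
              · rw [if_neg h4] at h
                rw [pv_acc] at h
                cases hp : pvPloopA f [] (if c = '(' then ')' else '}') (some rest) with
                | mk e2 r2 =>
                  rw [hp] at h
                  cases e2 with
                  | none => exact absurd h (by simp)
                  | some e2 =>
                    obtain ⟨he, hr⟩ := Prod.mk.injEq .. ▸ h
                    cases he
                    obtain ⟨-, p, hpq, hlen⟩ := ih.2 _ _ _ _ hp
                    cases hpq
                    exact ⟨by simp, by rw [← hr]; simp; omega⟩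
    · intro tc pat e rem h
      simp only [pvPloopA] at h
      cases pat with
      | none => rw [pvCoreAOpt_none] at h; exact absurd h (by simp)
      | some p =>
        cases hc : pvCoreA f p with
        | mk i r1 =>
          rw [pvCoreAOpt_some, hc] at h
          cases i with
          | none => exact absurd h (by simp)
          | some inner =>
            dsimp only at h
            obtain ⟨hne, hlt⟩ := ih.1 p inner r1 hc
            by_cases hit : inner = [tc]
            · rw [if_pos hit] at h
              obtain ⟨he, hr⟩ := Prod.mk.injEq .. ▸ h
              cases he
              exact ⟨by simpa using hne, p, rfl, by rw [← hr]; exact hlt⟩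
            · rw [if_neg hit] at h
              rw [show ([] : List Char) ++ inner = inner from rfl, pv_acc] at h
              cases hp : pvPloopA f [] tc r1 with
              | mk e2 r2 =>
                rw [hp] at h
                cases e2 with
                | none => exact absurd h (by simp)
                | some e2 =>
                  obtain ⟨he, hr⟩ := Prod.mk.injEq .. ▸ h
                  cases he
                  obtain ⟨-, p1, hp1, hl1⟩ := ih.2 tc r1 e2 r2 hp
                  refine ⟨by simp [hne], p, rfl, ?_⟩
                  rw [← hr]
                  have : pvOptLen r1 = p1.length := by rw [hp1]; rfl
                  omega

-- on failure both components are none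
lemma pv_nn : ∀ (fuel : Nat),
    (∀ l r, pvCoreA fuel l = (none, r) → r = none) ∧
    (∀ acc tc pat r, pvPloopA fuel acc tc pat = (none, r) → r = none) := by
  intro fuel
  induction fuel with
  | zero =>
    constructor
    · intro l r h; rw [pvCoreA_zero] at h; injection h with h1 h2; exact h2.symm
    · intro acc tc pat r h; rw [pvPloopA_zero] at h; injection h with h1 h2; exact h2.symm
  | succ f ih =>
    constructor
    · intro l r h
      cases l with
      | nil => rw [pvCoreA_nil] at h; injection h with h1 h2; exact h2.symm
      | cons c rest =>
        unfold pvCoreA at h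
        by_cases h1 : ¬(c = 'a' ∨ c = '(' ∨ c = '{' ∨ c = 'v')
        · rw [if_pos h1] at h; exact absurd h (by simp)
        · rw [if_neg h1] at h
          by_cases h2 : rest = []
          · rw [if_pos h2] at h; simpa using congrArg Prod.snd h.symm
          · rw [if_neg h2] at h
            by_cases h3 : c = 'a'
            · rw [if_pos h3] at h
              cases hc : pvCoreA f rest with
              | mk na r1 =>
                rw [hc] at h
                cases na with
                | none => simpa using congrArg Prod.snd h.symm
                | some na => exact absurd h (by simp)
            · rw [if_neg h3] at h
              by_cases h4 : c = 'v'
              · rw [if_pos h4] at h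
                cases rest with
                | nil => exact absurd rfl h2
                | cons x t2 => exact absurd h (by simp)
              · rw [if_neg h4] at h
                exact ih.2 _ _ _ _ h
    · intro acc tc pat r h
      simp only [pvPloopA] at h
      cases pat with
      | none =>
        simp only [pvCoreAOpt_none] at h
        injection h with h1 h2; exact h2.symm
      | some p =>
        cases hc : pvCoreA f p with
        | mk i r1 =>
          rw [pvCoreAOpt_some, hc] at h
          cases i with
          | none => simpa using congrArg Prod.snd h.symm
          | some inner =>
            dsimp only at h
            by_cases hit : inner = [tc]
            · rw [if_pos hit] at h; exact absurd h (by simp)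
            · rw [if_neg hit] at h; exact ih.2 _ _ _ _ h

-- A-side denotation of B's scanner state: closers = pending groups, pending = inside
-- an array prefix; used only by the proofs below.
def pvM (fa : Nat) : List Char → List Char → Bool → Option (List Char) → Option (List Char) × Option (List Char)
  | out, [], _, pat =>
    (match pvCoreAOpt fa pat with
     | (none, _) => (none, none)
     | (some e, rem) => (some (out ++ e), rem))
  | out, tc :: cs, true, pat =>
    (match pvCoreAOpt fa pat with
     | (none, _) => (none, none)
     | (some e, rem) => pvM fa (out ++ e) (tc :: cs) false rem)
  | out, tc :: cs, false, pat =>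
    (match pvPloopA fa [] tc pat with
     | (none, _) => (none, none)
     | (some e, rem) =>
       match cs with
       | [] => (some (out ++ e), rem)
       | c2 :: cs2 => pvM fa (out ++ e) (c2 :: cs2) false rem)
termination_by _ closers pending _ => 2 * closers.length + (if pending then 1 else 0)
decreasing_by all_goals simp <;> omega

lemma pvM_pat_none : ∀ (fa : Nat) (out closers : List Char) (pending : Bool),
    pvM fa out closers pending none = (none, none) := by
  intro fa out closers pending
  cases closers with
  | nil => cases pending <;> simp [pvM, pvCoreAOpt]
  | cons tc cs => cases pending <;> simp [pvM, pvCoreAOpt, pvPloopA_none]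

lemma pvPloopA_eq_pvM : ∀ (f : Nat) (tc : Char) (pat : Option (List Char)),
    pvPloopA f [] tc pat = pvM f [] [tc] false pat := by
  intro f tc pat
  simp only [pvM]
  cases hp : pvPloopA f [] tc pat with
  | mk e r =>
    cases e with
    | none => simp [(pv_nn f).2 _ _ _ _ hp]
    | some e => simp


lemma pvOptLen_some (l : List Char) : pvOptLen (some l) = l.length := rfl
lemma pvOptLen_none : pvOptLen none = 0 := rfl

lemma pvPloopA_step (f : Nat) (acc : List Char) (target : Char) (pat : Option (List Char)) :
    pvPloopA (f + 1) acc target pat =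
      (match pvCoreAOpt f pat with
       | (none, _) => (none, none)
       | (some inner, rem) =>
         if inner = [target] then (some (acc ++ inner), rem)
         else pvPloopA f (acc ++ inner) target rem) := by
  simp only [pvPloopA]

lemma pvCoreA_single (f : Nat) (c : Char) (hc : c = 'a' ∨ c = '(' ∨ c = '{' ∨ c = 'v') :
    pvCoreA (f + 1) [c] = (none, none) := by
  conv_lhs => rw [pvCoreA.eq_def]
  dsimp only
  rw [if_neg (not_not_intro hc), if_pos rfl]

lemma pvCoreA_a (f : Nat) (t : List Char) (ht : t ≠ []) :
    pvCoreA (f + 1) ('a' :: t) =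
      (match pvCoreA f t with
       | (some na, rem) => (some ('a' :: na), rem)
       | (none, _) => (none, none)) := by
  conv_lhs => rw [pvCoreA.eq_def]
  dsimp only
  rw [if_neg (by simp), if_neg ht, if_pos rfl]

lemma pvCoreA_v (f : Nat) (x : Char) (t2 : List Char) :
    pvCoreA (f + 1) ('v' :: x :: t2) =
      (some ('v' :: ':' :: (pvVScan t2 1).1), some (pvVScan t2 1).2) := by
  conv_lhs => rw [pvCoreA.eq_def]
  dsimp only
  rw [if_neg (by simp), if_neg (by simp), if_neg (by decide), if_pos rfl]

lemma pvCoreA_paren (f : Nat) (c : Char) (hc : c = '(' ∨ c = '{') (t : List Char) (ht : t ≠ []) :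
    pvCoreA (f + 1) (c :: t) =
      pvPloopA f [c] (if c = '(' then ')' else '}') (some t) := by
  rcases hc with h | h <;> subst h <;>
    (conv_lhs => rw [pvCoreA.eq_def]) <;> dsimp only <;>
    rw [if_neg (by decide), if_neg ht, if_neg (by decide), if_neg (by decide)]

lemma pvCoreA_plain (f : Nat) (c : Char) (hc : ¬(c = 'a' ∨ c = '(' ∨ c = '{' ∨ c = 'v'))
    (t : List Char) :
    pvCoreA (f + 1) (c :: t) = (some [c], if t = [] then none else some t) := by
  conv_lhs => rw [pvCoreA.eq_def]
  dsimp only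
  rw [if_pos hc]

lemma pvBloop_a (f : Nat) (out closers : List Char) (pending : Bool) (t : List Char) :
    pvBloop (f + 1) out closers pending ('a' :: t) = pvBloop f (out ++ ['a']) closers true t := by
  conv_lhs => rw [pvBloop.eq_def]
  dsimp only
  rw [if_pos rfl]

lemma pvBloop_paren (f : Nat) (out closers : List Char) (pending : Bool) (c : Char)
    (hc : c = '(' ∨ c = '{') (t : List Char) :
    pvBloop (f + 1) out closers pending (c :: t) =
      pvBloop f (out ++ [c]) ((if c = '(' then ')' else '}') :: closers) false t := by
  rcases hc with h | h <;> subst h <;>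
    (conv_lhs => rw [pvBloop.eq_def]) <;> dsimp only <;>
    rw [if_neg (by decide), if_pos (by decide)]

lemma pvBloop_v_nil (f : Nat) (out closers : List Char) (pending : Bool) :
    pvBloop (f + 1) out closers pending ['v'] = (none, none) := by
  conv_lhs => rw [pvBloop.eq_def]
  dsimp only
  rw [if_neg (by decide), if_neg (by decide), if_pos rfl]

lemma pvBloop_v (f : Nat) (out closers : List Char) (pending : Bool) (x : Char) (t2 : List Char) :
    pvBloop (f + 1) out closers pending ('v' :: x :: t2) =
      (if closers = [] then
        (some (out ++ 'v' :: ':' :: (pvVScan t2 1).1), some (pvVScan t2 1).2)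
      else pvBloop f (out ++ 'v' :: ':' :: (pvVScan t2 1).1) closers false (pvVScan t2 1).2) := by
  conv_lhs => rw [pvBloop.eq_def]
  dsimp only
  rw [if_neg (by decide), if_neg (by decide), if_pos rfl]

lemma pvBloop_plain (f : Nat) (out closers : List Char) (pending : Bool) (c : Char)
    (hc : ¬(c = 'a' ∨ c = '(' ∨ c = '{' ∨ c = 'v')) (t : List Char) :
    pvBloop (f + 1) out closers pending (c :: t) =
      (match closers with
       | [] => (some (out ++ [c]), if t = [] then none else some t)
       | tc :: cs =>
         if pending = false ∧ c = tc then
           if cs = [] then (some (out ++ [c]), if t = [] then none else some t)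
           else pvBloop f (out ++ [c]) cs false t
         else pvBloop f (out ++ [c]) (tc :: cs) false t) := by
  conv_lhs => rw [pvBloop.eq_def]
  dsimp only
  rw [if_neg (fun h => hc (Or.inl h)),
      if_neg (fun h => hc (Or.inr (h.imp_right Or.inl))),
      if_neg (fun h => hc (Or.inr (Or.inr (Or.inr h))))]

lemma pvBloop_plain_nil (f : Nat) (out : List Char) (pending : Bool) (c : Char)
    (hc : ¬(c = 'a' ∨ c = '(' ∨ c = '{' ∨ c = 'v')) (t : List Char) :
    pvBloop (f + 1) out [] pending (c :: t) =
      (some (out ++ [c]), if t = [] then none else some t) := by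
  rw [pvBloop_plain _ _ _ _ _ hc]

lemma pvBloop_plain_cons (f : Nat) (out : List Char) (tc : Char) (cs : List Char)
    (pending : Bool) (c : Char)
    (hc : ¬(c = 'a' ∨ c = '(' ∨ c = '{' ∨ c = 'v')) (t : List Char) :
    pvBloop (f + 1) out (tc :: cs) pending (c :: t) =
      (if pending = false ∧ c = tc then
        if cs = [] then (some (out ++ [c]), if t = [] then none else some t)
        else pvBloop f (out ++ [c]) cs false t
      else pvBloop f (out ++ [c]) (tc :: cs) false t) := by
  rw [pvBloop_plain _ _ _ _ _ hc]

lemma pvM_nil (fa : Nat) (out : List Char) (pd : Bool) (pat : Option (List Char)) :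
    pvM fa out [] pd pat =
      (match pvCoreAOpt fa pat with
       | (none, _) => (none, none)
       | (some e, rem) => (some (out ++ e), rem)) := by
  rw [pvM.eq_def]

lemma pvM_true (fa : Nat) (out : List Char) (tc : Char) (cs : List Char)
    (pat : Option (List Char)) :
    pvM fa out (tc :: cs) true pat =
      (match pvCoreAOpt fa pat with
       | (none, _) => (none, none)
       | (some e, rem) => pvM fa (out ++ e) (tc :: cs) false rem) := by
  rw [pvM.eq_def]

lemma pvM_false (fa : Nat) (out : List Char) (tc : Char) (cs : List Char)
    (pat : Option (List Char)) :
    pvM fa out (tc :: cs) false pat =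
      (match pvPloopA fa [] tc pat with
       | (none, _) => (none, none)
       | (some e, rem) =>
         match cs with
         | [] => (some (out ++ e), rem)
         | c2 :: cs2 => pvM fa (out ++ e) (c2 :: cs2) false rem) := by
  rw [pvM.eq_def]

lemma pv_main : ∀ (n : Nat) (l : List Char), l.length ≤ n →
    ∀ fa, 2 * l.length + 3 ≤ fa → ∀ fb, l.length + 1 ≤ fb →
    ∀ out closers pending,
    pvM fa out closers pending (some l) = pvBloop fb out closers pending l := by
  intro n
  induction n using Nat.strong_induction_on with
  | _ n IH =>
  intro l hl fa hfa fb hfb out closers pending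
  have HB : ∀ (l' : List Char), l'.length < l.length →
      ∀ fa', 2 * l'.length + 3 ≤ fa' → ∀ fb', l'.length + 1 ≤ fb' →
      ∀ o c p, pvM fa' o c p (some l') = pvBloop fb' o c p l' := by
    intro l' hl' fa' ha' fb' hb' o c p
    exact IH l'.length (by omega) l' le_rfl fa' ha' fb' hb' o c p
  have HFI : ∀ (p : Option (List Char)), pvOptLen p < l.length →
      ∀ f1 f2, 2 * pvOptLen p + 3 ≤ f1 → 2 * pvOptLen p + 3 ≤ f2 →
      ∀ o c pd, pvM f1 o c pd p = pvM f2 o c pd p := by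
    intro p hp f1 f2 h1 h2 o c pd
    cases p with
    | none => rw [pvM_pat_none, pvM_pat_none]
    | some l' =>
      rw [HB l' (by simpa [pvOptLen] using hp) f1 (by simpa [pvOptLen] using h1) (l'.length + 1) le_rfl,
          HB l' (by simpa [pvOptLen] using hp) f2 (by simpa [pvOptLen] using h2) (l'.length + 1) le_rfl]
  have HFIp : ∀ (tc : Char) (p : Option (List Char)), pvOptLen p < l.length →
      ∀ f1 f2, 2 * pvOptLen p + 3 ≤ f1 → 2 * pvOptLen p + 3 ≤ f2 →
      pvPloopA f1 [] tc p = pvPloopA f2 [] tc p := by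
    intro tc p hp f1 f2 h1 h2
    rw [pvPloopA_eq_pvM, pvPloopA_eq_pvM]
    exact HFI p hp f1 f2 h1 h2 [] [tc] false
  obtain ⟨fa1, rfl⟩ : ∃ m, fa = m + 1 := ⟨fa - 1, by omega⟩
  obtain ⟨fb1, rfl⟩ : ∃ m, fb = m + 1 := ⟨fb - 1, by omega⟩
  cases l with
  | nil =>
    rw [pvBloop_nil]
    cases closers with
    | nil => cases pending <;> simp [pvM, pvCoreAOpt, pvCoreA_nil]
    | cons tc cs =>
      cases pending <;>
        simp [pvM, pvCoreAOpt, pvCoreA_nil, pvPloopA, pvPloopA_none]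
  | cons c t =>
    simp only [List.length_cons] at hl hfa hfb
    by_cases hca : c = 'a'
    · subst hca
      rw [pvBloop_a]
      cases t with
      | nil =>
        rw [pvBloop_nil]
        obtain ⟨fa2, rfl⟩ : ∃ m, fa1 = m + 1 := ⟨fa1 - 1, by omega⟩
        cases closers with
        | nil => rw [pvM_nil, pvCoreAOpt_some, pvCoreA_single _ _ (by decide)]
        | cons tc cs =>
          cases pending with
          | true => rw [pvM_true, pvCoreAOpt_some, pvCoreA_single _ _ (by decide)]
          | false =>
            rw [pvM_false, pvPloopA_step, pvCoreAOpt_some, pvCoreA_single _ _ (by decide)]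
      | cons x t' =>
        simp only [List.length_cons] at hl hfa hfb
        cases closers with
        | nil =>
          rw [pvM_nil, pvCoreAOpt_some, pvCoreA_a _ _ (by simp),
              ← HB (x :: t') (by simp) fa1 (by try simp only [List.length_cons, pvOptLen_some, pvOptLen_none] at *; omega) fb1 (by try simp only [List.length_cons, pvOptLen_some, pvOptLen_none] at *; omega) (out ++ ['a']) [] true,
              pvM_nil, pvCoreAOpt_some]
          cases hct : pvCoreA fa1 (x :: t') with
          | mk i r =>
            cases i with
            | none => rfl
            | some na => simp
        | cons tc cs =>
          cases pending with
          | true =>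
            rw [pvM_true, pvCoreAOpt_some, pvCoreA_a _ _ (by simp),
                ← HB (x :: t') (by simp) fa1 (by try simp only [List.length_cons, pvOptLen_some, pvOptLen_none] at *; omega) fb1 (by try simp only [List.length_cons, pvOptLen_some, pvOptLen_none] at *; omega) (out ++ ['a']) (tc :: cs) true,
                pvM_true, pvCoreAOpt_some]
            cases hct : pvCoreA fa1 (x :: t') with
            | mk i r =>
              cases i with
              | none => rfl
              | some na =>
                have hel := (pv_elem fa1).1 _ _ _ hct
                simp only [List.length_cons] at hel
                show pvM (fa1 + 1) (out ++ 'a' :: na) (tc :: cs) false r =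
                  pvM fa1 ((out ++ ['a']) ++ na) (tc :: cs) false r
                rw [show (out ++ ['a']) ++ na = out ++ 'a' :: na from by simp]
                exact HFI r (by try simp only [List.length_cons, pvOptLen_some, pvOptLen_none] at *; omega) (fa1 + 1) fa1 (by omega) (by omega) _ _ _
          | false =>
            obtain ⟨fa2, rfl⟩ : ∃ m, fa1 = m + 1 := ⟨fa1 - 1, by omega⟩
            rw [pvM_false, pvPloopA_step, pvCoreAOpt_some, pvCoreA_a _ _ (by simp),
                ← HB (x :: t') (by simp) fa2 (by try simp only [List.length_cons, pvOptLen_some, pvOptLen_none] at *; omega) fb1 (by try simp only [List.length_cons, pvOptLen_some, pvOptLen_none] at *; omega) (out ++ ['a']) (tc :: cs) true,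
                pvM_true, pvCoreAOpt_some]
            cases hct : pvCoreA fa2 (x :: t') with
            | mk i r =>
              cases i with
              | none => rfl
              | some na =>
                have hel := (pv_elem fa2).1 _ _ _ hct
                simp only [List.length_cons] at hel
                have hne : ('a' :: na) ≠ [tc] := by
                  cases na with
                  | nil => exact absurd rfl hel.1
                  | cons y ys => simp
                show (match (if ('a' :: na) = [tc] then (some ([] ++ 'a' :: na), r)
                        else pvPloopA (fa2 + 1) ([] ++ 'a' :: na) tc r) with
                      | (none, _) => ((none : Option (List Char)), (none : Option (List Char)))
                      | (some e, rem) =>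
                        match cs with
                        | [] => (some (out ++ e), rem)
                        | c2 :: cs2 => pvM (fa2 + 1 + 1) (out ++ e) (c2 :: cs2) false rem) =
                    pvM fa2 ((out ++ ['a']) ++ na) (tc :: cs) false r
                rw [if_neg hne, show ([] : List Char) ++ 'a' :: na = 'a' :: na from by simp,
                    pv_acc (fa2 + 1) ('a' :: na) tc r,
                    HFIp tc r (by try simp only [List.length_cons, pvOptLen_some, pvOptLen_none] at *; omega) (fa2 + 1) fa2 (by omega) (by omega),
                    pvM_false]
                cases hp2 : pvPloopA fa2 [] tc r with
                | mk e2 r2 =>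
                  cases e2 with
                  | none => rfl
                  | some e2 =>
                    have hel2 := (pv_elem fa2).2 _ _ _ _ hp2
                    obtain ⟨p1, hp1, hlt2⟩ := hel2.2
                    have hr1 : pvOptLen r = p1.length := by rw [hp1]; rfl
                    cases cs with
                    | nil => simp
                    | cons c2 cs2 =>
                      show pvM (fa2 + 1 + 1) (out ++ ('a' :: na ++ e2)) (c2 :: cs2) false r2 =
                        pvM fa2 (((out ++ ['a']) ++ na) ++ e2) (c2 :: cs2) false r2
                      rw [show ((out ++ ['a']) ++ na) ++ e2 = out ++ ('a' :: na ++ e2) from by simp]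
                      exact HFI r2 (by try simp only [List.length_cons, pvOptLen_some, pvOptLen_none] at *; omega) (fa2 + 1 + 1) fa2 (by omega) (by omega) _ _ _
    · by_cases hcp : c = '(' ∨ c = '{'
      · rw [pvBloop_paren _ _ _ _ _ hcp]
        have hcs : c = 'a' ∨ c = '(' ∨ c = '{' ∨ c = 'v' := Or.inr (hcp.imp_right Or.inl)
        cases t with
        | nil =>
          rw [pvBloop_nil]
          obtain ⟨fa2, rfl⟩ : ∃ m, fa1 = m + 1 := ⟨fa1 - 1, by omega⟩
          cases closers with
          | nil => rw [pvM_nil, pvCoreAOpt_some, pvCoreA_single _ _ hcs]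
          | cons tc cs =>
            cases pending with
            | true => rw [pvM_true, pvCoreAOpt_some, pvCoreA_single _ _ hcs]
            | false =>
              rw [pvM_false, pvPloopA_step, pvCoreAOpt_some, pvCoreA_single _ _ hcs]
        | cons x t' =>
          simp only [List.length_cons] at hl hfa hfb
          cases closers with
          | nil =>
            rw [pvM_nil, pvCoreAOpt_some, pvCoreA_paren _ _ hcp _ (by simp),
                pv_acc fa1 [c],
                ← HB (x :: t') (by simp) fa1 (by try simp only [List.length_cons, pvOptLen_some, pvOptLen_none] at *; omega) fb1 (by try simp only [List.length_cons, pvOptLen_some, pvOptLen_none] at *; omega) (out ++ [c])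
                  [if c = '(' then ')' else '}'] false,
                pvM_false]
            cases hp : pvPloopA fa1 [] (if c = '(' then ')' else '}') (some (x :: t')) with
            | mk e r =>
              cases e with
              | none => rfl
              | some e => simp
          | cons tc cs =>
            cases pending with
            | true =>
              rw [pvM_true, pvCoreAOpt_some, pvCoreA_paren _ _ hcp _ (by simp),
                  pv_acc fa1 [c],
                  ← HB (x :: t') (by simp) fa1 (by try simp only [List.length_cons, pvOptLen_some, pvOptLen_none] at *; omega) fb1 (by try simp only [List.length_cons, pvOptLen_some, pvOptLen_none] at *; omega) (out ++ [c])
                    ((if c = '(' then ')' else '}') :: tc :: cs) false,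
                  pvM_false]
              cases hp : pvPloopA fa1 [] (if c = '(' then ')' else '}') (some (x :: t')) with
              | mk e r =>
                cases e with
                | none => rfl
                | some e =>
                  have hel := (pv_elem fa1).2 _ _ _ _ hp
                  obtain ⟨p1, hp1, hlt⟩ := hel.2
                  have hp1' : p1 = x :: t' := by injection hp1 with h; exact h.symm
                  subst hp1'
                  simp only [List.length_cons] at hlt
                  show pvM (fa1 + 1) (out ++ ([c] ++ e)) (tc :: cs) false r =
                    pvM fa1 ((out ++ [c]) ++ e) (tc :: cs) false r
                  rw [show (out ++ [c]) ++ e = out ++ ([c] ++ e) from by simp]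
                  exact HFI r (by try simp only [List.length_cons, pvOptLen_some, pvOptLen_none] at *; omega) (fa1 + 1) fa1 (by omega) (by omega) _ _ _
            | false =>
              obtain ⟨fa2, rfl⟩ : ∃ m, fa1 = m + 1 := ⟨fa1 - 1, by omega⟩
              rw [pvM_false, pvPloopA_step, pvCoreAOpt_some, pvCoreA_paren _ _ hcp _ (by simp),
                  pv_acc fa2 [c],
                  ← HB (x :: t') (by simp) fa2 (by try simp only [List.length_cons, pvOptLen_some, pvOptLen_none] at *; omega) fb1 (by try simp only [List.length_cons, pvOptLen_some, pvOptLen_none] at *; omega) (out ++ [c])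
                    ((if c = '(' then ')' else '}') :: tc :: cs) false,
                  pvM_false]
              cases hp : pvPloopA fa2 [] (if c = '(' then ')' else '}') (some (x :: t')) with
              | mk e r =>
                cases e with
                | none => rfl
                | some e =>
                  have hel := (pv_elem fa2).2 _ _ _ _ hp
                  obtain ⟨p1, hp1, hlt⟩ := hel.2
                  have hp1' : p1 = x :: t' := by injection hp1 with h; exact h.symm
                  subst hp1'
                  simp only [List.length_cons] at hlt
                  have hne : ([c] ++ e) ≠ [tc] := by
                    cases e with
                    | nil => exact absurd rfl hel.1
                    | cons y ys => simp
                  show (match (if ([c] ++ e) = [tc] then (some ([] ++ ([c] ++ e)), r)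
                          else pvPloopA (fa2 + 1) ([] ++ ([c] ++ e)) tc r) with
                        | (none, _) => ((none : Option (List Char)), (none : Option (List Char)))
                        | (some e', rem) =>
                          match cs with
                          | [] => (some (out ++ e'), rem)
                          | c2 :: cs2 => pvM (fa2 + 1 + 1) (out ++ e') (c2 :: cs2) false rem) =
                      pvM fa2 ((out ++ [c]) ++ e) (tc :: cs) false r
                  rw [if_neg hne, show ([] : List Char) ++ ([c] ++ e) = [c] ++ e from by simp,
                      pv_acc (fa2 + 1) ([c] ++ e) tc r,
                      HFIp tc r (by try simp only [List.length_cons, pvOptLen_some, pvOptLen_none] at *; omega) (fa2 + 1) fa2 (by omega) (by omega),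
                      pvM_false]
                  cases hp2 : pvPloopA fa2 [] tc r with
                  | mk e2 r2 =>
                    cases e2 with
                    | none => rfl
                    | some e2 =>
                      have hel2 := (pv_elem fa2).2 _ _ _ _ hp2
                      obtain ⟨p2, hp2', hlt2⟩ := hel2.2
                      have hr1 : pvOptLen r = p2.length := by rw [hp2']; rfl
                      cases cs with
                      | nil => simp
                      | cons c2 cs2 =>
                        show pvM (fa2 + 1 + 1) (out ++ ([c] ++ e ++ e2)) (c2 :: cs2) false r2 =
                          pvM fa2 (((out ++ [c]) ++ e) ++ e2) (c2 :: cs2) false r2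
                        rw [show ((out ++ [c]) ++ e) ++ e2 = out ++ ([c] ++ e ++ e2) from by simp]
                        exact HFI r2 (by try simp only [List.length_cons, pvOptLen_some, pvOptLen_none] at *; omega) (fa2 + 1 + 1) fa2 (by omega) (by omega) _ _ _
      · by_cases hcv : c = 'v'
        · subst hcv
          cases t with
          | nil =>
            rw [pvBloop_v_nil]
            obtain ⟨fa2, rfl⟩ : ∃ m, fa1 = m + 1 := ⟨fa1 - 1, by omega⟩
            cases closers with
            | nil => rw [pvM_nil, pvCoreAOpt_some, pvCoreA_single _ _ (by decide)]
            | cons tc cs =>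
              cases pending with
              | true => rw [pvM_true, pvCoreAOpt_some, pvCoreA_single _ _ (by decide)]
              | false =>
                rw [pvM_false, pvPloopA_step, pvCoreAOpt_some, pvCoreA_single _ _ (by decide)]
          | cons x t2 =>
            simp only [List.length_cons] at hl hfa hfb
            have hvl := pvVScan_len t2 1
            rw [pvBloop_v]
            cases closers with
            | nil =>
              rw [if_pos rfl, pvM_nil, pvCoreAOpt_some, pvCoreA_v]
            | cons tc cs =>
              rw [if_neg (by simp)]
              cases pending with
              | true =>
                rw [pvM_true, pvCoreAOpt_some, pvCoreA_v]
                exact HB (pvVScan t2 1).2 (by try simp only [List.length_cons, pvOptLen_some, pvOptLen_none] at *; omega) (fa1 + 1) (by omega) fb1 (by omega) _ _ _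
              | false =>
                obtain ⟨fa2, rfl⟩ : ∃ m, fa1 = m + 1 := ⟨fa1 - 1, by omega⟩
                rw [pvM_false, pvPloopA_step, pvCoreAOpt_some, pvCoreA_v]
                show (match (if ('v' :: ':' :: (pvVScan t2 1).1) = [tc] then
                          (some ([] ++ 'v' :: ':' :: (pvVScan t2 1).1), some (pvVScan t2 1).2)
                        else pvPloopA (fa2 + 1) ([] ++ 'v' :: ':' :: (pvVScan t2 1).1) tc
                          (some (pvVScan t2 1).2)) with
                      | (none, _) => ((none : Option (List Char)), (none : Option (List Char)))
                      | (some e', rem) =>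
                        match cs with
                        | [] => (some (out ++ e'), rem)
                        | c2 :: cs2 => pvM (fa2 + 1 + 1) (out ++ e') (c2 :: cs2) false rem) =
                    pvBloop fb1 (out ++ 'v' :: ':' :: (pvVScan t2 1).1) (tc :: cs) false (pvVScan t2 1).2
                rw [if_neg (by simp), show ([] : List Char) ++ 'v' :: ':' :: (pvVScan t2 1).1 =
                      'v' :: ':' :: (pvVScan t2 1).1 from by simp,
                    pv_acc (fa2 + 1) ('v' :: ':' :: (pvVScan t2 1).1) tc (some (pvVScan t2 1).2),
                    HFIp tc (some (pvVScan t2 1).2) (by try simp only [List.length_cons, pvOptLen_some, pvOptLen_none] at *; omega) (fa2 + 1) fa2 (by try simp only [List.length_cons, pvOptLen_some, pvOptLen_none] at *; omega) (by try simp only [List.length_cons, pvOptLen_some, pvOptLen_none] at *; omega),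
                    ← HB (pvVScan t2 1).2 (by try simp only [List.length_cons, pvOptLen_some, pvOptLen_none] at *; omega) fa2 (by try simp only [List.length_cons, pvOptLen_some, pvOptLen_none] at *; omega) fb1 (by try simp only [List.length_cons, pvOptLen_some, pvOptLen_none] at *; omega)
                      (out ++ 'v' :: ':' :: (pvVScan t2 1).1) (tc :: cs) false,
                    pvM_false]
                cases hp2 : pvPloopA fa2 [] tc (some (pvVScan t2 1).2) with
                | mk e2 r2 =>
                  cases e2 with
                  | none => rfl
                  | some e2 =>
                    have hel2 := (pv_elem fa2).2 _ _ _ _ hp2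
                    obtain ⟨p2, hp2', hlt2⟩ := hel2.2
                    have hp2'' : p2 = (pvVScan t2 1).2 := by injection hp2' with h; exact h.symm
                    subst hp2''
                    cases cs with
                    | nil => simp
                    | cons c2 cs2 =>
                      show pvM (fa2 + 1 + 1) (out ++ ('v' :: ':' :: (pvVScan t2 1).1 ++ e2)) (c2 :: cs2) false r2 =
                        pvM fa2 ((out ++ 'v' :: ':' :: (pvVScan t2 1).1) ++ e2) (c2 :: cs2) false r2
                      rw [show (out ++ 'v' :: ':' :: (pvVScan t2 1).1) ++ e2 =
                            out ++ ('v' :: ':' :: (pvVScan t2 1).1 ++ e2) from by simp]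
                      exact HFI r2 (by try simp only [List.length_cons, pvOptLen_some, pvOptLen_none] at *; omega) (fa2 + 1 + 1) fa2 (by omega) (by omega) _ _ _
        · have hsp : ¬(c = 'a' ∨ c = '(' ∨ c = '{' ∨ c = 'v') := by tauto
          cases closers with
          | nil =>
            rw [pvBloop_plain_nil _ _ _ _ hsp, pvM_nil, pvCoreAOpt_some, pvCoreA_plain _ _ hsp]
          | cons tc cs =>
            cases pending with
            | true =>
              rw [pvBloop_plain_cons _ _ _ _ _ _ hsp,
                  if_neg (show ¬(true = false ∧ c = tc) from by simp),
                  pvM_true, pvCoreAOpt_some, pvCoreA_plain _ _ hsp]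
              cases t with
              | nil =>
                show pvM (fa1 + 1) (out ++ [c]) (tc :: cs) false
                    (if ([] : List Char) = [] then none else some []) =
                  pvBloop fb1 (out ++ [c]) (tc :: cs) false []
                rw [if_pos rfl, pvM_pat_none, pvBloop_nil]
              | cons y ys =>
                show pvM (fa1 + 1) (out ++ [c]) (tc :: cs) false
                    (if (y :: ys : List Char) = [] then none else some (y :: ys)) =
                  pvBloop fb1 (out ++ [c]) (tc :: cs) false (y :: ys)
                rw [if_neg (show ¬(y :: ys : List Char) = [] from by simp)]
                exact HB (y :: ys) (by try simp only [List.length_cons, pvOptLen_some, pvOptLen_none] at *; omega)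
                  (fa1 + 1) (by try simp only [List.length_cons, pvOptLen_some, pvOptLen_none] at *; omega)
                  fb1 (by try simp only [List.length_cons, pvOptLen_some, pvOptLen_none] at *; omega) _ _ _
            | false =>
              obtain ⟨fa2, rfl⟩ : ∃ m, fa1 = m + 1 := ⟨fa1 - 1, by omega⟩
              rw [pvBloop_plain_cons _ _ _ _ _ _ hsp, pvM_false, pvPloopA_step, pvCoreAOpt_some,
                  pvCoreA_plain _ _ hsp]
              dsimp only
              by_cases hct : c = tc
              · have hic : ([c] : List Char) = [tc] := by rw [hct]
                rw [if_pos (show (false = false ∧ c = tc) from ⟨rfl, hct⟩), if_pos hic]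
                show (match ((some (([] : List Char) ++ [c]),
                        if t = [] then (none : Option (List Char)) else some t)) with
                      | (none, _) => ((none : Option (List Char)), (none : Option (List Char)))
                      | (some e', rem) =>
                        match cs with
                        | [] => (some (out ++ e'), rem)
                        | c2 :: cs2 => pvM (fa2 + 1 + 1) (out ++ e') (c2 :: cs2) false rem) =
                    (if (cs : List Char) = [] then
                      (some (out ++ [c]), if t = [] then none else some t)
                    else pvBloop fb1 (out ++ [c]) cs false t)
                cases cs with
                | nil => rw [if_pos rfl]; simp
                | cons c2 cs2 =>
                  rw [if_neg (show ¬(c2 :: cs2 : List Char) = [] from by simp)]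
                  show pvM (fa2 + 1 + 1) (out ++ ([] ++ [c])) (c2 :: cs2) false
                      (if t = [] then none else some t) =
                    pvBloop fb1 (out ++ [c]) (c2 :: cs2) false t
                  rw [show ([] : List Char) ++ [c] = [c] from rfl]
                  cases t with
                  | nil => rw [if_pos rfl, pvM_pat_none, pvBloop_nil]
                  | cons y ys =>
                    rw [if_neg (show ¬(y :: ys : List Char) = [] from by simp)]
                    exact HB (y :: ys) (by try simp only [List.length_cons, pvOptLen_some, pvOptLen_none] at *; omega)
                      (fa2 + 1 + 1) (by try simp only [List.length_cons, pvOptLen_some, pvOptLen_none] at *; omega)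
                      fb1 (by try simp only [List.length_cons, pvOptLen_some, pvOptLen_none] at *; omega) _ _ _
              · have hne : ([c] : List Char) ≠ [tc] := by simpa using hct
                rw [if_neg hne, if_neg (show ¬(false = false ∧ c = tc) from by simp [hct]),
                    show ([] : List Char) ++ [c] = [c] from rfl]
                cases t with
                | nil =>
                  rw [if_pos (show ([] : List Char) = [] from rfl), pvPloopA_none, pvBloop_nil]
                | cons y ys =>
                  rw [if_neg (show ¬(y :: ys : List Char) = [] from by simp), pv_acc (fa2 + 1) [c],
                      HFIp tc (some (y :: ys)) (by try simp only [List.length_cons, pvOptLen_some, pvOptLen_none] at *; omega)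
                        (fa2 + 1) fa2 (by try simp only [List.length_cons, pvOptLen_some, pvOptLen_none] at *; omega)
                        (by try simp only [List.length_cons, pvOptLen_some, pvOptLen_none] at *; omega),
                      ← HB (y :: ys) (by try simp only [List.length_cons, pvOptLen_some, pvOptLen_none] at *; omega)
                        fa2 (by try simp only [List.length_cons, pvOptLen_some, pvOptLen_none] at *; omega)
                        fb1 (by try simp only [List.length_cons, pvOptLen_some, pvOptLen_none] at *; omega)
                        (out ++ [c]) (tc :: cs) false,
                      pvM_false]
                  cases hp2 : pvPloopA fa2 [] tc (some (y :: ys)) with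
                  | mk e2 r2 =>
                    cases e2 with
                    | none => rfl
                    | some e2 =>
                      have hel2 := (pv_elem fa2).2 _ _ _ _ hp2
                      obtain ⟨p2, hp2', hlt2⟩ := hel2.2
                      have hp2'' : p2 = y :: ys := by injection hp2' with h; exact h.symm
                      subst hp2''
                      simp only [List.length_cons] at hlt2
                      cases cs with
                      | nil => simp
                      | cons c2 cs2 =>
                        show pvM (fa2 + 1 + 1) (out ++ ([c] ++ e2)) (c2 :: cs2) false r2 =
                          pvM fa2 ((out ++ [c]) ++ e2) (c2 :: cs2) false r2
                        rw [show (out ++ [c]) ++ e2 = out ++ ([c] ++ e2) from by simp]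
                        exact HFI r2 (by try simp only [List.length_cons, pvOptLen_some, pvOptLen_none] at *; omega)
                          (fa2 + 1 + 1) fa2 (by try simp only [List.length_cons, pvOptLen_some, pvOptLen_none] at *; omega)
                          (by try simp only [List.length_cons, pvOptLen_some, pvOptLen_none] at *; omega) _ _ _

-- ===== VERDICT (by name: the statement is the Claim_ definition above) =====
theorem isolate_format_py_spec : Claim_equal_isolate_format_py := by
  intro args _ _
  unfold Spec_isolate_format_py
  cases args with
  | none => rfl
  | some s =>
    have hA : isolate_format_py (some s) =
        ((pvCoreA (2 * s.toList.length + 4) s.toList).1.map String.ofList,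
         (pvCoreA (2 * s.toList.length + 4) s.toList).2.map String.ofList) := rfl
    have hB : isolate_format_py_alt (some s) =
        ((pvBloop (s.toList.length + 1) [] [] false s.toList).1.map String.ofList,
         (pvBloop (s.toList.length + 1) [] [] false s.toList).2.map String.ofList) := rfl
    have hmain := pv_main s.toList.length s.toList le_rfl (2 * s.toList.length + 4) (by omega)
      (s.toList.length + 1) le_rfl [] [] false
    rw [hA, hB, ← hmain]
    generalize s.toList = l
    cases hc : pvCoreA (2 * l.length + 4) l with
    | mk a r =>
      cases a with
      | none =>
        have hr : r = none := (pv_nn _).1 _ _ hc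
        subst hr
        simp [pvM, pvCoreAOpt, hc]
      | some e => simp [pvM, pvCoreAOpt, hc]
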